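-- pv_equiv track=rewrite | github.com/alexanderfrei/Easy_Python_Bill_Lubanovic | Algorithms_methods/Greedy.py | diff_parts
-- ===== SOURCE A (Python) =====
-- def diff_parts(n):
--     if n < 3:
--         return [n]
--     parts = []
--     cumsum = 0
--     for i in range(1, n):
--         if 2 * i + 1 + cumsum <= n or cumsum + i == n:
--             cumsum += i
--             parts.append(i)
--             if cumsum == n: break
--
--     return parts
-- ===== SOURCE B (Python) =====
-- def diff_parts(n):
--     if n < 3:
--         return [n]
--     m, total = 0, 0
--     while total + m + 1 <= n:
--         m += 1
--         total += m
--     parts = list(range(1, m + 1))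
--     parts[-1] += n - total
--     return parts
-- ===== Notes on version B (the rewrite author's own statement) =====
-- stated objective: simpler
-- what changed: B drops A's forward skip-scan over the whole range (which tests each candidate until the completing part fires) and instead finds the largest count of consecutive parts whose triangular sum fits, then absorbs the remainder into the last part.
import Mathlib
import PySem

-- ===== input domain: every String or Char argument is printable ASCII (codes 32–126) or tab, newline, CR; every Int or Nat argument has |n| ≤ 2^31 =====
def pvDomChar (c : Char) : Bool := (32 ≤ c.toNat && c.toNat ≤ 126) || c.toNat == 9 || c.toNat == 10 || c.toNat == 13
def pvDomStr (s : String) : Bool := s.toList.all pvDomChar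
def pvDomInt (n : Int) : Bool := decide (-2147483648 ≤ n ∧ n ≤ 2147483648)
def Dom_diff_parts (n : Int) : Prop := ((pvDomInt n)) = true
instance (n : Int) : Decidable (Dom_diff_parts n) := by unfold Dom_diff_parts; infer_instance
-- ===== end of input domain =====

-- B computes the break point by remainder absorption instead of A's forward skip-scan (simpler decomposition, no speed claim).

-- ===== PORT A =====
-- loop body of A's for-loop: state = (parts, cumsum, broken?)
def stepA (n : Int) (st : List Int × Int × Bool) (i : Int) : List Int × Int × Bool :=
  if st.2.2 then st
  else if 2 * i + 1 + st.2.1 ≤ n ∨ st.2.1 + i = n then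
    (st.1 ++ [i], st.2.1 + i, decide (st.2.1 + i = n))
  else st

def diff_parts (n : Int) : List Int :=
  if n < 3 then [n]
  else ((PySem.List.pyRange 1 n 1).foldl (stepA n) ([], 0, false)).1

-- ===== PORT B =====
-- the while loop of B: grow m while total + m + 1 <= n (m, total stay nonnegative in B)
def findB (n : Int) (m total : Nat) : Nat × Nat :=
  if (total : Int) + m + 1 ≤ n then findB n (m + 1) (total + m + 1) else (m, total)
termination_by n.toNat - total
decreasing_by omega

def diff_parts_alt (n : Int) : List Int :=
  if n < 3 then [n]
  else
    let p := findB n 0 0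
    let parts := PySem.List.pyRange 1 ((p.1 : Int) + 1) 1
    parts.dropLast ++ [parts.getLast! + (n - (p.2 : Int))]

-- ===== PRECONDITION & SPEC =====
def Spec_diff_parts (n : Int) (out : List Int) : Prop := out = diff_parts_alt n
instance (n : Int) (out : List Int) : Decidable (Spec_diff_parts n out) := by unfold Spec_diff_parts; infer_instance

-- ===== CLAIM (what is proved, stated in full; the proofs are below) =====
def Claim_equal_diff_parts : Prop := ∀ (n : Int), Dom_diff_parts n → Spec_diff_parts n (diff_parts n)

-- ===== LEMMAS AND PROOFS =====

lemma foldl_fix {α β : Type} (f : α → β → α) (s : α) :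
    ∀ l : List β, (∀ x ∈ l, f s x = s) → l.foldl f s = s := by
  intro l
  induction l with
  | nil => intro _; rfl
  | cons x xs ih =>
      intro h
      simp only [List.foldl_cons, h x (by simp)]
      exact ih (fun y hy => h y (by simp [hy]))

-- characterization of B's while loop
lemma findB_spec (n : Int) (m total : Nat)
    (hinv : 2 * (total : Int) = (m : Int) * (m + 1)) (hle : (total : Int) ≤ n) :
    2 * ((findB n m total).2 : Int) = ((findB n m total).1 : Int) * ((findB n m total).1 + 1) ∧
    ((findB n m total).2 : Int) ≤ n ∧
    n < ((findB n m total).2 : Int) + ((findB n m total).1 : Int) + 1 := by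
  fun_induction findB n m total with
  | case1 m total hc ih =>
      apply ih
      · push_cast; nlinarith [hinv]
      · push_cast; linarith
  | case2 m total hc =>
      exact ⟨hinv, hle, by push_cast at hc ⊢; linarith⟩

-- phase 1 of A's loop: it appends 1..k while (k+1)(k+2) ≤ 2n
lemma phase1 (n M : Int) (hM : M * (M + 1) ≤ 2 * n) :
    ∀ k : Nat, (k : Int) ≤ M - 1 →
      ∃ c : Int, (PySem.List.pyRange 1 ((k : Int) + 1) 1).foldl (stepA n) ([], 0, false)
          = (PySem.List.pyRange 1 ((k : Int) + 1) 1, c, false) ∧ 2 * c = (k : Int) * ((k : Int) + 1) := by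
  intro k
  induction k with
  | zero =>
      intro _
      refine ⟨0, ?_, by ring⟩
      rw [show ((0:Nat) : Int) + 1 = 1 by norm_num,
        PySem.List.pyRange_one_eq_nil (le_refl (1:Int))]
      rfl
  | succ k ih =>
      intro hk
      obtain ⟨c, hfold, hc⟩ := ih (by push_cast at hk; linarith)
      have hsplit : PySem.List.pyRange 1 (((k+1 : Nat) : Int) + 1) 1
          = PySem.List.pyRange 1 ((k : Int) + 1) 1 ++ [(k : Int) + 1] := by
        push_cast
        exact PySem.List.pyRange_one_succ_right (by omega)
      have hcond : 2 * ((k : Int) + 1) + 1 + c ≤ n := by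
        push_cast at hk; nlinarith
      have hne : ¬ (c + ((k : Int) + 1) = n) := by
        intro h
        push_cast at hk; nlinarith
      refine ⟨c + ((k : Int) + 1), ?_, by push_cast; nlinarith⟩
      rw [hsplit, List.foldl_append, hfold]
      simp only [List.foldl_cons, List.foldl_nil, stepA]
      simp [hcond, hne]

lemma main_eq (n : Int) : diff_parts n = diff_parts_alt n := by
  unfold diff_parts diff_parts_alt
  by_cases h3 : n < 3
  · simp [h3]
  · simp only [h3, if_false]
    have hn3 : 3 ≤ n := by linarith
    obtain ⟨hT, hTn, hnT⟩ := findB_spec n 0 0 (by norm_num) (by norm_num; linarith)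
    set M : Int := ((findB n 0 0).1 : Int) with hMdef
    set T : Int := ((findB n 0 0).2 : Int) with hTdef
    have hM0 : 0 ≤ M := by positivity
    have hM2 : 2 ≤ M := by
      by_contra hlt
      have h1 : M ≤ 1 := by omega
      have : M * (M + 1) ≤ 2 := by nlinarith
      omega
    set S : Int := T - M with hSdef
    have hS : 2 * S = M * (M - 1) := by nlinarith
    have hS1 : 1 ≤ S := by nlinarith
    set istar : Int := n - S with hIdef
    have hiM : M ≤ istar := by omega
    have hin : istar + 1 ≤ n := by omega
    -- B's value
    have hBparts : PySem.List.pyRange 1 (M + 1) 1 = PySem.List.pyRange 1 M 1 ++ [M] :=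
      PySem.List.pyRange_one_succ_right (by omega)
    have hB : (PySem.List.pyRange 1 (M + 1) 1).dropLast
        ++ [(PySem.List.pyRange 1 (M + 1) 1).getLast! + (n - T)]
        = PySem.List.pyRange 1 M 1 ++ [istar] := by
      have hgl : (PySem.List.pyRange 1 M 1 ++ [M]).getLast! = M := by simp
      rw [hBparts, List.dropLast_concat, hgl]
      congr 2
      omega
    -- A's loop, phase 1: i = 1 .. M-1
    have hk : (((M - 1).toNat : Int)) = M - 1 := Int.toNat_of_nonneg (by omega)
    obtain ⟨c, hfold1, hc⟩ := phase1 n M (by nlinarith) (M - 1).toNat (by omega)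
    rw [hk] at hfold1 hc
    have hcS : c = S := by nlinarith
    rw [hcS] at hfold1
    rw [show M - 1 + 1 = M by ring] at hfold1
    -- split the range
    have hsplit : PySem.List.pyRange 1 n 1
        = PySem.List.pyRange 1 M 1 ++ (PySem.List.pyRange M istar 1
          ++ ([istar] ++ PySem.List.pyRange (istar + 1) n 1)) := by
      rw [← PySem.List.pyRange_one_singleton (a := istar),
        ← PySem.List.pyRange_one_append istar (istar + 1) n (by omega) hin,
        ← PySem.List.pyRange_one_append M istar n hiM (by omega),
        ← PySem.List.pyRange_one_append 1 M n (by omega) (by omega)]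
    -- phase 2: skip segment is a no-op
    have hskip : (PySem.List.pyRange M istar 1).foldl (stepA n)
        (PySem.List.pyRange 1 M 1, S, false) = (PySem.List.pyRange 1 M 1, S, false) := by
      apply foldl_fix
      intro x hx
      rw [PySem.List.mem_pyRange_one] at hx
      have hxc : ¬ (2 * x + 1 + S ≤ n) := by nlinarith [hx.1, hx.2]
      have hxe : ¬ (S + x = n) := by omega
      simp [stepA, hxc, hxe]
    -- the completing part
    have hhit : stepA n (PySem.List.pyRange 1 M 1, S, false) istar
        = (PySem.List.pyRange 1 M 1 ++ [istar], n, true) := by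
      have h1 : S + istar = n := by omega
      simp [stepA, h1]
    -- phase 3: after break, no-op
    have hrest : (PySem.List.pyRange (istar + 1) n 1).foldl (stepA n)
        (PySem.List.pyRange 1 M 1 ++ [istar], n, true)
        = (PySem.List.pyRange 1 M 1 ++ [istar], n, true) := by
      apply foldl_fix
      intro x _
      simp [stepA]
    rw [hsplit, List.foldl_append, hfold1, List.foldl_append, hskip,
      List.foldl_append, List.foldl_cons, List.foldl_nil, hhit, hrest, hB]

-- ===== VERDICT (by name: the statement is the Claim_ definition above) =====
theorem diff_parts_spec : Claim_equal_diff_parts := by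
  intro n _
  exact main_eq n
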